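-- pv_equiv track=rewrite | github.com/zjpf/DAN-MSR | dataset/mlm_cate_sample.py | get_f_sess
-- ===== SOURCE A (Python) =====
-- def get_f_sess(ts_list):
--     f_sess = [0]
--     si = 0
--     p_ts = ts_list[0]
--     for i in range(1, len(ts_list)):
--         if ts_list[i]-p_ts > 30*60:
--             si += 1
--         f_sess.append(si)
--         p_ts = ts_list[i]
--     return {'f_sess': f_sess}
-- ===== SOURCE B (Python) =====
-- def get_f_sess(ts_list):
--     # Group the timestamps into explicit session buckets, then emit each
--     # element's id as the position of its bucket.
--     sessions = [[ts_list[0]]]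
--     for t in ts_list[1:]:
--         if t - sessions[-1][-1] > 30 * 60:
--             sessions.append([t])
--         else:
--             sessions[-1].append(t)
--     f_sess = []
--     for k, sess in enumerate(sessions):
--         f_sess += [k] * len(sess)
--     return {'f_sess': f_sess}
-- ===== Notes on version B (the rewrite author's own statement) =====
-- stated objective: alternative
-- what changed: B builds an explicit list of session buckets (appending each timestamp to the last bucket or opening a new one) and then derives every element's id as its bucket's position via enumerate, instead of A's single indexed loop carrying a previous-timestamp variable and an inline integer counter.
import Mathlib
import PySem

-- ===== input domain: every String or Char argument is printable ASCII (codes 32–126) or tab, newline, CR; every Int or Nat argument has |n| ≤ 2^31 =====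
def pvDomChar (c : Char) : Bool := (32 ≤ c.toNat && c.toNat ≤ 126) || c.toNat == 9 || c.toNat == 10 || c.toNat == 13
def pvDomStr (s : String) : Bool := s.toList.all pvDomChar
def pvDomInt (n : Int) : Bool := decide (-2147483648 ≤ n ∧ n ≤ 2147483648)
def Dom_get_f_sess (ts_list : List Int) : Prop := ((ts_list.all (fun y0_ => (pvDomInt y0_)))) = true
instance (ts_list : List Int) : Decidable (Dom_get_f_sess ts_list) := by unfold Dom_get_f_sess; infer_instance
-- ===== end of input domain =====

-- B groups the timestamps into explicit session buckets and then emits each bucket's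
-- position as the ids, instead of A's inline counter loop; same cost, alternative structure.

-- ===== PORT A =====
def get_f_sess (ts_list : List Int) : List (String × List Int) :=
  let p_ts := PySem.List.pyGetD ts_list 0 0          -- ts_list[0]; Pre_ guarantees nonempty
  let st := (PySem.List.pyRange 1 (ts_list.length : Int) 1).foldl
      (fun (st : List Int × Int × Int) i =>
        let t := PySem.List.pyGetD ts_list i 0
        let si := if t - st.2.2 > 30 * 60 then st.2.1 + 1 else st.2.1
        (st.1 ++ [si], si, t))
      ([0], 0, p_ts)
  [("f_sess", st.1)]

-- ===== PORT B =====
def get_f_sess_alt (ts_list : List Int) : List (String × List Int) :=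
  let sessions := (PySem.List.slice ts_list (some 1) none).foldl
      (fun (sessions : List (List Int)) t =>
        if t - PySem.List.pyGetD (PySem.List.pyGetD sessions (-1) []) (-1) 0 > 30 * 60 then
          sessions ++ [[t]]
        else
          sessions.dropLast ++ [PySem.List.pyGetD sessions (-1) [] ++ [t]])
      [[PySem.List.pyGetD ts_list 0 0]]                -- ts_list[0]; Pre_ guarantees nonempty
  let f_sess := (PySem.List.enumerate sessions 0).foldl
      (fun acc p => acc ++ List.replicate p.2.length p.1) []
  [("f_sess", f_sess)]

-- ===== PRECONDITION & SPEC =====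
-- Python A raises IndexError on the empty list (ts_list[0]); exactly that input is excluded.
def Pre_get_f_sess (ts_list : List Int) : Prop := ts_list ≠ []
instance (ts_list : List Int) : Decidable (Pre_get_f_sess ts_list) := by unfold Pre_get_f_sess; infer_instance
def pvWitness_get_f_sess : List Int := ([40, 2000, 2100])

def Spec_get_f_sess (ts_list : List Int) (out : List (String × List Int)) : Prop := out = get_f_sess_alt ts_list
instance (ts_list : List Int) (out : List (String × List Int)) : Decidable (Spec_get_f_sess ts_list out) := by unfold Spec_get_f_sess; infer_instance

-- ===== CLAIM (what is proved, stated in full; the proofs are below) =====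
def Claim_equal_get_f_sess : Prop := ∀ (ts_list : List Int), Dom_get_f_sess ts_list → Pre_get_f_sess ts_list → Spec_get_f_sess ts_list (get_f_sess ts_list)

-- ===== LEMMAS AND PROOFS =====

-- Proof-side spelling of B's second loop: ids emitted bucket by bucket from position k.
def pvEmitFrom (k : Int) : List (List Int) → List Int
  | [] => []
  | s :: S => List.replicate s.length k ++ pvEmitFrom (k + 1) S

theorem pvEmit_foldl (S : List (List Int)) : ∀ (k : Int) (f : List Int),
    (PySem.List.enumerate S k).foldl (fun acc p => acc ++ List.replicate p.2.length p.1) f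
      = f ++ pvEmitFrom k S := by
  induction S with
  | nil => intro k f; simp [PySem.List.enumerate, pvEmitFrom]
  | cons s S ih =>
    intro k f
    rw [PySem.List.enumerate_cons, List.foldl_cons, ih, pvEmitFrom, List.append_assoc]

theorem pvEmitFrom_extend (S : List (List Int)) : ∀ (k : Int) (l : List Int) (t : Int),
    pvEmitFrom k (S ++ [l ++ [t]]) = pvEmitFrom k (S ++ [l]) ++ [k + S.length] := by
  induction S with
  | nil => intro k l t; simp [pvEmitFrom, List.replicate_succ']
  | cons s S ih => intro k l t; simp [pvEmitFrom, ih, List.append_assoc]; ring_nf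

theorem pvEmitFrom_new (S : List (List Int)) : ∀ (k : Int) (t : Int),
    pvEmitFrom k (S ++ [[t]]) = pvEmitFrom k S ++ [k + S.length] := by
  induction S with
  | nil => intro k t; simp [pvEmitFrom]
  | cons s S ih => intro k t; simp [pvEmitFrom, ih, List.append_assoc]; ring_nf

theorem pv_last_pyGetD (l : List Int) : PySem.List.pyGetD l (-1) 0 = l.getLastD 0 := by
  cases l with
  | nil => rfl
  | cons x xs =>
    rw [PySem.List.pyGetD_neg_one (x :: xs) 0 (List.cons_ne_nil x xs)]
    simp [List.getLastD_eq_getLast?, List.getLast?_eq_some_getLast]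

-- A's counter loop vs B's bucket-building loop: if the current buckets are S ++ [l],
-- A's state (ids so far, counter, previous timestamp) is determined by the buckets.
theorem pv_sess_agree (xs : List Int) : ∀ (S : List (List Int)) (l : List Int),
    (xs.foldl
      (fun (st : List Int × Int × Int) t =>
        (st.1 ++ [if t - st.2.2 > 30 * 60 then st.2.1 + 1 else st.2.1],
         if t - st.2.2 > 30 * 60 then st.2.1 + 1 else st.2.1, t))
      (pvEmitFrom 0 (S ++ [l]), (S.length : Int), PySem.List.pyGetD l (-1) 0)).1
    = pvEmitFrom 0 (xs.foldl
        (fun (sessions : List (List Int)) t =>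
          if t - PySem.List.pyGetD (PySem.List.pyGetD sessions (-1) []) (-1) 0 > 30 * 60 then
            sessions ++ [[t]]
          else
            sessions.dropLast ++ [PySem.List.pyGetD sessions (-1) [] ++ [t]])
        (S ++ [l])) := by
  induction xs with
  | nil => intro S l; rfl
  | cons t rest ih =>
    intro S l
    simp only [List.foldl_cons, PySem.List.pyGetD_neg_one_append_singleton,
      List.dropLast_concat]
    by_cases h : t - PySem.List.pyGetD l (-1) 0 > 30 * 60
    · simp only [if_pos h]
      have h1 : PySem.List.pyGetD ([t]) (-1) 0 = t :=
        PySem.List.pyGetD_neg_one_append_singleton (xs := []) (x := t) (d := 0)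
      have hx := ih (S ++ [l]) [t]
      rw [pvEmitFrom_new, h1] at hx
      simp only [List.length_append, List.length_cons, List.length_nil, Nat.cast_add,
        Nat.cast_one, zero_add] at hx
      exact hx
    · simp only [if_neg h]
      have hx := ih S (l ++ [t])
      rw [pvEmitFrom_extend, PySem.List.pyGetD_neg_one_append_singleton] at hx
      simp only [zero_add] at hx
      exact hx

-- ===== VERDICT (by name: the statement is the Claim_ definition above) =====
theorem get_f_sess_spec : Claim_equal_get_f_sess := by
  intro ts_list _ hpre
  unfold Spec_get_f_sess get_f_sess get_f_sess_alt
  obtain ⟨x, xs, rfl⟩ := List.exists_cons_of_ne_nil hpre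
  simp only []
  rw [PySem.List.foldl_pyRange_pyGetD' (x :: xs) 0
        (fun (st : List Int × Int × Int) t =>
          let si := if t - st.2.2 > 30 * 60 then st.2.1 + 1 else st.2.1
          (st.1 ++ [si], si, t)) ([0], 0, PySem.List.pyGetD (x :: xs) 0 0) (a := 1) (by omega)]
  simp only [Int.toNat_one, List.drop_one, List.tail_cons, PySem.List.pyGetD_zero_cons,
    PySem.List.slice_from_one]
  rw [pvEmit_foldl]
  have h := pv_sess_agree xs [] [x]
  simpa [pvEmitFrom, pv_last_pyGetD] using h
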